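-- pv_equiv track=rewrite | github.com/aphmaster/abac-rule-extraction | notebooks/utils.py | get_pattern_indexes
-- ===== SOURCE A (Python) =====
-- def get_pattern_indexes(entries, f_pattern_dict):
--
--     indexes = set()
--
--     for e_idx,entry in enumerate(entries):
--         flag = True
--
--         for att_idx,vals in f_pattern_dict.items():
--             if not entry[att_idx] in vals:
--                 flag = False
--
--         if flag: indexes.add(e_idx)
--
--     return indexes
-- ===== SOURCE B (Python) =====
-- def get_pattern_indexes(entries, f_pattern_dict):
--     result = set(range(len(entries)))
--     for att_idx, vals in f_pattern_dict.items():
--         result &= {e_idx for e_idx, entry in enumerate(entries) if entry[att_idx] in vals}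
--     return result
-- ===== Notes on version B (the rewrite author's own statement) =====
-- stated objective: alternative
-- what changed: Inverted the traversal: instead of looping over entries and testing every constraint per entry, B seeds the result with all indexes and intersects in, constraint by constraint, the set of indexes whose entry satisfies that constraint.
import Mathlib
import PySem

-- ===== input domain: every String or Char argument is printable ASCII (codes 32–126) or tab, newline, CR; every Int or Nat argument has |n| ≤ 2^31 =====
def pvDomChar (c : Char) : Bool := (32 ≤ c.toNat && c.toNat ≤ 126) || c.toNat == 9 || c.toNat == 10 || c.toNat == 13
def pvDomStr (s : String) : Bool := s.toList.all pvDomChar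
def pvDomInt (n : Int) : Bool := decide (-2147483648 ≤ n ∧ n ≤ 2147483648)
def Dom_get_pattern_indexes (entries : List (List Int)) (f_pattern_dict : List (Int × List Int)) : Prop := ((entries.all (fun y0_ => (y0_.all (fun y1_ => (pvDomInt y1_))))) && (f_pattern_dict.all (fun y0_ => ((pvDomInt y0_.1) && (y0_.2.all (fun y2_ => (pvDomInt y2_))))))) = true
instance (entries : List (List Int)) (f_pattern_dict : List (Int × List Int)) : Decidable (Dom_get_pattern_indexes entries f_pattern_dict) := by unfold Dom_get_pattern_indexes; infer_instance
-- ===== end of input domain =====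

-- B inverts the traversal (per-constraint intersection of index sets instead of per-entry checks); same cost, alternative decomposition.


-- ===== PORT A =====
-- literal port of A: for each (index, entry), fold over all constraints keeping a flag, add the index to the result set if the flag survived.
-- (pyGet? … ).getD 0 : Pre_ guarantees pyGet? is `some`, so the default is never read on admitted inputs.
def get_pattern_indexes (entries : List (List Int)) (f_pattern_dict : List (Int × List Int)) : List Int :=
  (PySem.List.enumerate entries).foldl
    (fun indexes p =>
      let flag := f_pattern_dict.foldl
        (fun flag q =>
          if ¬ (q.2.contains ((PySem.List.pyGet? p.2 q.1).getD 0)) then false else flag) true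
      if flag then PySem.Set.add indexes p.1 else indexes)
    []

-- ===== PORT B =====
-- literal port of B: result = set(range(len(entries))); for each constraint, intersect with the set of indexes whose entry matches it.
def get_pattern_indexes_alt (entries : List (List Int)) (f_pattern_dict : List (Int × List Int)) : List Int :=
  f_pattern_dict.foldl
    (fun result q =>
      PySem.Set.inter result
        ((PySem.List.enumerate entries).foldl
          (fun s p =>
            if q.2.contains ((PySem.List.pyGet? p.2 q.1).getD 0) then PySem.Set.add s p.1 else s)
          []))
    (PySem.Set.ofList (PySem.List.pyRange 0 (PySem.List.len entries)))

-- ===== PRECONDITION & SPEC =====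
-- Pre_: every constraint's attribute index is a valid Python index into every entry (otherwise the Python A raises IndexError).
def Pre_get_pattern_indexes (entries : List (List Int)) (f_pattern_dict : List (Int × List Int)) : Prop :=
  ∀ entry ∈ entries, ∀ q ∈ f_pattern_dict, PySem.Raise.InRange entry.length q.1
instance (entries : List (List Int)) (f_pattern_dict : List (Int × List Int)) : Decidable (Pre_get_pattern_indexes entries f_pattern_dict) := by unfold Pre_get_pattern_indexes; infer_instance
def pvWitness_get_pattern_indexes : List (List Int) × (List (Int × List Int)) := ([[1, 2], [3, 4]], [(0, [1, 3]), (1, [2])])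
def Spec_get_pattern_indexes (entries : List (List Int)) (f_pattern_dict : List (Int × List Int)) (out : List Int) : Prop := out = get_pattern_indexes_alt entries f_pattern_dict
instance (entries : List (List Int)) (f_pattern_dict : List (Int × List Int)) (out : List Int) : Decidable (Spec_get_pattern_indexes entries f_pattern_dict out) := by unfold Spec_get_pattern_indexes; infer_instance

-- ===== CLAIM (what is proved, stated in full; the proofs are below) =====
def Claim_equal_get_pattern_indexes : Prop := ∀ (entries : List (List Int)) (f_pattern_dict : List (Int × List Int)), Dom_get_pattern_indexes entries f_pattern_dict → Pre_get_pattern_indexes entries f_pattern_dict → Spec_get_pattern_indexes entries f_pattern_dict (get_pattern_indexes entries f_pattern_dict)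

-- ===== LEMMAS AND PROOFS =====

-- the per-constraint test both programs perform on one entry
def pvTest (q : Int × List Int) (entry : List Int) : Bool :=
  q.2.contains ((PySem.List.pyGet? entry q.1).getD 0)

-- A's inner flag loop is `b && all`
theorem pvFlagFold (l : List (Int × List Int)) (entry : List Int) (b : Bool) :
    l.foldl (fun flag q => if ¬ (q.2.contains ((PySem.List.pyGet? entry q.1).getD 0)) then false else flag) b
      = (b && l.all (fun q => pvTest q entry)) := by
  induction l generalizing b with
  | nil => simp
  | cons q l ih =>
    simp only [List.foldl_cons, List.all_cons, ih, pvTest]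
    simp [Bool.and_comm, Bool.and_assoc]

-- the "conditionally add the running index to a set" loop builds the filtered index list
theorem pvEnumAdd (xs : List (List Int)) (P : List Int → Bool) :
    ∀ (s : Int) (acc : List Int), (∀ j ∈ acc, j < s) →
    (PySem.List.enumerate xs s).foldl (fun ac p => if P p.2 then PySem.Set.add ac p.1 else ac) acc
      = acc ++ ((PySem.List.enumerate xs s).filter (fun p => P p.2)).map (·.1) := by
  induction xs with
  | nil => intro s acc _; simp [PySem.List.enumerate_nil]
  | cons x xs ih =>
    intro s acc hacc
    rw [PySem.List.enumerate_cons]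
    simp only [List.foldl_cons]
    by_cases h : P x = true
    · rw [if_pos h, PySem.Set.add_of_not_mem (fun hmem => lt_irrefl s (hacc s hmem)),
          ih (s + 1) (acc ++ [s]) (by intro j hj; rcases List.mem_append.1 hj with h' | h' <;> [exact lt_of_lt_of_le (hacc j h') (by omega); (simp at h'; omega)])]
      simp [h]
    · rw [if_neg (by simp [h]), ih (s + 1) acc (fun j hj => lt_of_lt_of_le (hacc j hj) (by omega))]
      simp [h]

-- first components of enumerate are injective on its members
theorem pvEnumFstInj (xs : List (List Int)) (p p' : Int × List Int)
    (hp : p ∈ PySem.List.enumerate xs) (hp' : p' ∈ PySem.List.enumerate xs) (h : p.1 = p'.1) : p = p' := by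
  rcases (PySem.List.mem_enumerate_iff xs 0 p).1 hp with ⟨k, hk, rfl⟩
  rcases (PySem.List.mem_enumerate_iff xs 0 p').1 hp' with ⟨k', hk', rfl⟩
  simp only at h
  have : k = k' := by omega
  subst this; rfl

-- membership of p.1 in the per-constraint index list decides the test on p.2
theorem pvContainsKeep (xs : List (List Int)) (Q : List Int → Bool) (p : Int × List Int)
    (hp : p ∈ PySem.List.enumerate xs) :
    (((PySem.List.enumerate xs).filter (fun r => Q r.2)).map (·.1)).contains p.1 = Q p.2 := by
  by_cases h : Q p.2 = true
  · rw [h]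
    exact List.contains_iff_mem.2 (List.mem_map.2 ⟨p, List.mem_filter.2 ⟨hp, h⟩, rfl⟩)
  · rw [Bool.eq_false_iff.2 h, Bool.eq_false_iff]
    intro hc
    rcases List.mem_map.1 (List.contains_iff_mem.1 hc) with ⟨p', hp'f, hfst⟩
    rcases List.mem_filter.1 hp'f with ⟨hp', hQ⟩
    exact h (by rw [pvEnumFstInj xs p p' hp hp' hfst.symm]; exact hQ)

-- B's intersection loop, over a filtered index list, accumulates the conjunction of all tests
theorem pvInterFold (xs : List (List Int)) (l : List (Int × List Int)) :
    ∀ (P : Int × List Int → Bool),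
    l.foldl
      (fun result q =>
        PySem.Set.inter result
          ((PySem.List.enumerate xs).foldl
            (fun s p => if q.2.contains ((PySem.List.pyGet? p.2 q.1).getD 0) then PySem.Set.add s p.1 else s) []))
      (((PySem.List.enumerate xs).filter P).map (·.1))
      = ((PySem.List.enumerate xs).filter (fun p => P p && l.all (fun q => pvTest q p.2))).map (·.1) := by
  induction l with
  | nil => intro P; simp
  | cons q l ih =>
    intro P
    simp only [List.foldl_cons]
    rw [pvEnumAdd xs (fun e => q.2.contains ((PySem.List.pyGet? e q.1).getD 0)) 0 [] (by simp)]
    have hstep : PySem.Set.inter (((PySem.List.enumerate xs).filter P).map (·.1))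
        (([] : List Int) ++ ((PySem.List.enumerate xs).filter (fun p => q.2.contains ((PySem.List.pyGet? p.2 q.1).getD 0))).map (·.1))
        = ((PySem.List.enumerate xs).filter (fun p => P p && q.2.contains ((PySem.List.pyGet? p.2 q.1).getD 0))).map (·.1) := by
      simp only [List.nil_append, PySem.Set.inter, List.filter_map, Function.comp_def, List.filter_filter]
      refine congrArg (List.map _) (List.filter_congr ?_)
      intro p hp
      rw [PySem.Set.contains_eq_listContains,
          pvContainsKeep xs (fun e => q.2.contains ((PySem.List.pyGet? e q.1).getD 0)) p hp, Bool.and_comm]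
    rw [hstep, ih (fun p => P p && q.2.contains ((PySem.List.pyGet? p.2 q.1).getD 0))]
    refine congrArg (List.map _) (List.filter_congr ?_)
    intro p _
    simp [pvTest, List.all_cons, Bool.and_assoc]

theorem pvAeq (entries : List (List Int)) (f_pattern_dict : List (Int × List Int)) :
    get_pattern_indexes entries f_pattern_dict
      = ((PySem.List.enumerate entries).filter (fun p => f_pattern_dict.all (fun q => pvTest q p.2))).map (·.1) := by
  unfold get_pattern_indexes
  have hbody : (fun (indexes : List Int) (p : Int × List Int) =>
      let flag := f_pattern_dict.foldl
        (fun flag q => if ¬ (q.2.contains ((PySem.List.pyGet? p.2 q.1).getD 0)) then false else flag) true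
      if flag then PySem.Set.add indexes p.1 else indexes)
      = (fun indexes p => if f_pattern_dict.all (fun q => pvTest q p.2) then PySem.Set.add indexes p.1 else indexes) := by
    funext indexes p
    simp only [pvFlagFold, Bool.true_and]
  rw [hbody]
  simpa using pvEnumAdd entries (fun e => f_pattern_dict.all (fun q => pvTest q e)) 0 [] (by simp)

theorem pvBeq (entries : List (List Int)) (f_pattern_dict : List (Int × List Int)) :
    get_pattern_indexes_alt entries f_pattern_dict
      = ((PySem.List.enumerate entries).filter (fun p => f_pattern_dict.all (fun q => pvTest q p.2))).map (·.1) := by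
  unfold get_pattern_indexes_alt
  have hinit : PySem.Set.ofList (PySem.List.pyRange 0 (PySem.List.len entries))
      = ((PySem.List.enumerate entries).filter (fun _ => true)).map (·.1) := by
    rw [PySem.Set.ofList_eq_self_of_nodup _ (PySem.List.nodup_pyRange_one 0 _), List.filter_true,
        PySem.List.map_fst_enumerate]
    simp [PySem.List.len]
  rw [hinit, pvInterFold entries f_pattern_dict (fun _ => true)]
  simp

-- ===== VERDICT (by name: the statement is the Claim_ definition above) =====
theorem get_pattern_indexes_spec : Claim_equal_get_pattern_indexes := by
  intro entries f_pattern_dict _ _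
  unfold Spec_get_pattern_indexes
  rw [pvAeq, pvBeq]
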